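-- pv_equiv track=rewrite | github.com/aleksandr-efimenko/LeetCode_practice | the_number_of_weak_characters_in_the_game_1996.py | numberOfWeakCharacters_improved_brute_force
-- ===== SOURCE A (Python) =====
-- from typing import List
--
-- def numberOfWeakCharacters_improved_brute_force(properties: List[List[int]]) -> int:
--     result = 0
--     properties = sorted(properties)
--     length = len(properties)
--     for i in range(length - 1):
--         if properties[i][0] < properties[-1][0]:
--             j = length - 1
--             while properties[i][1] >= properties[j][1] and j > i:
--                 j -= 1
--             if properties[i][1] < properties[j][1] and properties[i][0] < properties[j][0]:
--                 result += 1
--     return result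
-- ===== SOURCE B (Python) =====
-- from typing import List
--
-- def numberOfWeakCharacters_improved_brute_force(properties: List[List[int]]) -> int:
--     # sort by attack descending, defense ascending; sweep tracking the max defense seen so far
--     ordered = sorted(properties, key=lambda p: (-p[0], p[1]))
--     count = 0
--     max_def = None
--     for p in ordered:
--         if max_def is not None and p[1] < max_def:
--             count += 1
--         else:
--             max_def = p[1]
--     return count
-- ===== Notes on version B (the rewrite author's own statement) =====
-- stated objective: alternative
-- what changed: Replaces A's per-element right-to-left scan over the lexicographically sorted list with a single sort keyed on (-attack, defense) and one linear sweep tracking the running maximum defense.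
-- outside the precondition, e.g. on numberOfWeakCharacters_improved_brute_force([[5]]): A returns 0, B raises IndexError
import Mathlib
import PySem

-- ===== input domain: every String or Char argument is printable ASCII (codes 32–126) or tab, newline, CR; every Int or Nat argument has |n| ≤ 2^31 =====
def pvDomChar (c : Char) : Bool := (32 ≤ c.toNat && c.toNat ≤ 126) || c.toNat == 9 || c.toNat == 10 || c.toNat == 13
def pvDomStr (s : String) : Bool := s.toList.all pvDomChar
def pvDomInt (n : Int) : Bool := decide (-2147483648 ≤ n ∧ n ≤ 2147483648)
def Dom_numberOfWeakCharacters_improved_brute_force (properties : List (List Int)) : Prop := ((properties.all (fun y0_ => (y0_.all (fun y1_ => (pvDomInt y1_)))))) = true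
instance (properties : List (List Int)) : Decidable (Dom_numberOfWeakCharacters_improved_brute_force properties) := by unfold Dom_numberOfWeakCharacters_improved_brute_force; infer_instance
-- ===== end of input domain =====

-- B replaces A's per-element right-to-left scan over the lexicographically sorted list
-- by one sort keyed on (-attack, defense) and a single sweep tracking the running maximum defense.

-- ===== PORT A =====
-- l[k] / s[i] for an index known to be in range (guaranteed by Pre_: every row has ≥ 2 entries
-- and the indices used stay inside the list): exact there, since pyGet? returns some.
def pvIx (l : List Int) (k : Int) : Int := (PySem.List.pyGet? l k).getD 0
def pvRow (s : List (List Int)) (i : Int) : List Int := (PySem.List.pyGet? s i).getD []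
def pvAt (s : List (List Int)) (i k : Int) : Int := pvIx (pvRow s i) k

-- 'while properties[i][1] >= properties[j][1] and j > i: j -= 1'
def pvWhileA (s : List (List Int)) (i j : Int) : Int :=
  if pvAt s i 1 ≥ pvAt s j 1 ∧ i < j then pvWhileA s i (j - 1) else j
termination_by (j - i).toNat
decreasing_by omega

def numberOfWeakCharacters_improved_brute_force (properties : List (List Int)) : Int :=
  let result : Int := 0
  let s := PySem.List.sorted properties (fun x => x) false
  let length := s.length
  (PySem.List.pyRange 0 ((length : Int) - 1)).foldl
    (fun result i =>
      if pvAt s i 0 < pvAt s (-1) 0 then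
        let j := pvWhileA s i ((length : Int) - 1)
        if pvAt s i 1 < pvAt s j 1 ∧ pvAt s i 0 < pvAt s j 0 then result + 1 else result
      else result) result

-- ===== PORT B =====
-- loop body of B: state = (max_def : Option Int, count)
def pvStepB (st : Option Int × Int) (p : List Int) : Option Int × Int :=
  match st.1 with
  | some m => if pvIx p 1 < m then (st.1, st.2 + 1) else (some (pvIx p 1), st.2)
  | none => (some (pvIx p 1), st.2)

def numberOfWeakCharacters_improved_brute_force_alt (properties : List (List Int)) : Int :=
  let ordered := PySem.List.sorted2 properties (fun p => -(pvIx p 0)) (fun p => pvIx p 1)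
  (ordered.foldl pvStepB ((none : Option Int), (0 : Int))).2

-- ===== PRECONDITION & SPEC =====
-- Pre_ excludes inputs containing a row with fewer than two entries: on those A raises
-- IndexError except in degenerate cases (e.g. a single such row) where its loop never
-- reaches the row and it returns 0, while B's sort key always raises IndexError there.
def Pre_numberOfWeakCharacters_improved_brute_force (properties : List (List Int)) : Prop :=
  ∀ l ∈ properties, 2 ≤ l.length
instance (properties : List (List Int)) : Decidable (Pre_numberOfWeakCharacters_improved_brute_force properties) := by unfold Pre_numberOfWeakCharacters_improved_brute_force; infer_instance

def pvWitness_numberOfWeakCharacters_improved_brute_force : List (List Int) := [[1, 2], [2, 1], [3, 3]]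

def Spec_numberOfWeakCharacters_improved_brute_force (properties : List (List Int)) (out : Int) : Prop := out = numberOfWeakCharacters_improved_brute_force_alt properties
instance (properties : List (List Int)) (out : Int) : Decidable (Spec_numberOfWeakCharacters_improved_brute_force properties out) := by unfold Spec_numberOfWeakCharacters_improved_brute_force; infer_instance

-- ===== CLAIM (what is proved, stated in full; the proofs are below) =====
def Claim_equal_numberOfWeakCharacters_improved_brute_force : Prop := ∀ (properties : List (List Int)), Dom_numberOfWeakCharacters_improved_brute_force properties → Pre_numberOfWeakCharacters_improved_brute_force properties → Spec_numberOfWeakCharacters_improved_brute_force properties (numberOfWeakCharacters_improved_brute_force properties)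

-- ===== LEMMAS AND PROOFS =====

-- 'p is weak w.r.t. the character list ps' (both counts equal countP of this predicate)
def pvWeak (ps : List (List Int)) (p : List Int) : Bool :=
  ps.any (fun q => decide (pvIx p 0 < pvIx q 0) && decide (pvIx p 1 < pvIx q 1))

-- index normalisation
lemma pvRow_natCast (s : List (List Int)) (k : Nat) : pvRow s (k : Int) = s.getD k [] :=
  PySem.List.pyGetD_natCast s k []

lemma pvRow_neg_one (s : List (List Int)) (h : s ≠ []) :
    pvRow s (-1) = s.getD (s.length - 1) [] := by
  have hn : 1 ≤ s.length := List.length_pos_iff.mpr h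
  simp only [pvRow, PySem.List.pyGet?, PySem.List.pyIdx?]
  rw [if_neg (by omega), if_pos (by omega)]
  simp [List.getD_eq_getElem?_getD]

-- the sorted list, rows read through Python indexing with a nonnegative index
lemma pvRow_of_nonneg (s : List (List Int)) {i : Int} (hi : 0 ≤ i) :
    pvRow s i = s.getD i.toNat [] := PySem.List.pyGetD_of_nonneg s [] hi

-- heads of lex-ordered rows of length ≥ 2 are monotone
lemma pvHead_le_of_le {x y : List Int} (hx : 2 ≤ x.length) (hy : 2 ≤ y.length)
    (hxy : x ≤ y) : pvIx x 0 ≤ pvIx y 0 := by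
  rcases x with _ | ⟨a, xt⟩; · simp at hx
  rcases y with _ | ⟨c, yt⟩; · simp at hy
  simp only [pvIx, PySem.List.pyGet?, PySem.List.pyIdx?]
  norm_num
  by_contra hlt
  push Not at hlt
  exact (not_lt.mpr hxy) (List.cons_lt_cons_iff.mpr (Or.inl hlt))

-- counting a predicate over indices = countP over the list
lemma pvCountP_range {α : Type} (l : List α) (d : α) (p : α → Bool) :
    (List.range l.length).countP (fun i => p (l.getD i d)) = l.countP p := by
  induction l with
  | nil => simp
  | cons x t ih =>
    simp only [List.length_cons, List.range_succ_eq_map, List.countP_cons, List.countP_map,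
      Function.comp_def, List.getD_cons_succ, List.getD_cons_zero, List.countP_cons] at *
    omega

-- characterisation of A's inner while loop
lemma pvWhileA_spec (s : List (List Int)) (i j : Int) (hij : i ≤ j) :
    i ≤ pvWhileA s i j ∧ pvWhileA s i j ≤ j ∧
    (∀ k : Int, pvWhileA s i j < k → k ≤ j → pvAt s k 1 ≤ pvAt s i 1) ∧
    (pvWhileA s i j = i ∨ pvAt s i 1 < pvAt s (pvWhileA s i j) 1) := by
  have main : ∀ f : Nat, ∀ j : Int, (j - i).toNat ≤ f → i ≤ j →
      i ≤ pvWhileA s i j ∧ pvWhileA s i j ≤ j ∧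
      (∀ k : Int, pvWhileA s i j < k → k ≤ j → pvAt s k 1 ≤ pvAt s i 1) ∧
      (pvWhileA s i j = i ∨ pvAt s i 1 < pvAt s (pvWhileA s i j) 1) := by
    intro f
    induction f with
    | zero =>
      intro j hf hij'
      have hji : j = i := by omega
      subst hji
      rw [pvWhileA, if_neg (by simp)]
      exact ⟨le_refl _, le_refl _, fun k h1 h2 => absurd (lt_of_lt_of_le h1 h2) (lt_irrefl _),
        Or.inl rfl⟩
    | succ f ih =>
      intro j hf hij'
      rw [pvWhileA]
      by_cases hc : pvAt s i 1 ≥ pvAt s j 1 ∧ i < j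
      · rw [if_pos hc]
        obtain ⟨h1, h2, h3, h4⟩ := ih (j - 1) (by omega) (by omega)
        refine ⟨h1, by omega, ?_, h4⟩
        intro k hk1 hk2
        by_cases hkj : k = j
        · subst hkj; exact hc.1
        · exact h3 k hk1 (by omega)
      · rw [if_neg hc]
        push Not at hc
        refine ⟨hij', le_refl _, fun k h1 h2 => absurd (lt_of_lt_of_le h1 h2) (lt_irrefl _), ?_⟩
        by_cases hd : pvAt s i 1 ≥ pvAt s j 1
        · exact Or.inl (le_antisymm (hc hd) hij')
        · exact Or.inr (not_le.mp hd)
  exact main (j - i).toNat j le_rfl hij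

-- the list A sorts (Python's sorted with list comparison)
abbrev pvS (ps : List (List Int)) : List (List Int) := PySem.List.sorted ps (fun x => x)

-- first components of the sorted rows are monotone in the index
-- pvS with the linear-order instances (the Decidable instances agree by proof irrelevance)
lemma pvS_eq (ps : List (List Int)) :
    pvS ps = @PySem.List.sorted (List Int) (List Int) LinearOrder.toPartialOrder.toLT
      LinearOrder.toDecidableLT ps (fun x => x) false := by
  show @PySem.List.sorted (List Int) (List Int) List.instLT (fun a b => a.decidableLT b)
      ps (fun x => x) false = _
  rw [Subsingleton.elim (fun (a b : List Int) => a.decidableLT b)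
    (LinearOrder.toDecidableLT (α := List Int))]

lemma pvMono (ps : List (List Int)) (h : Pre_numberOfWeakCharacters_improved_brute_force ps)
    {a b : Nat} (hab : a ≤ b) (hb : b < (pvS ps).length) :
    pvIx ((pvS ps).getD a []) 0 ≤ pvIx ((pvS ps).getD b []) 0 := by
  have hperm : (pvS ps).Perm ps := PySem.List.sorted_perm ps (fun x => x) false
  rw [List.getD_eq_getElem _ _ (lt_of_le_of_lt hab hb), List.getD_eq_getElem _ _ hb]
  have hb' : b < (@PySem.List.sorted (List Int) (List Int) LinearOrder.toPartialOrder.toLT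
      LinearOrder.toDecidableLT ps (fun x => x) false).length := by
    rw [← pvS_eq ps]; exact hb
  have hmono := PySem.List.key_sorted_getElem_mono ps (fun x => x) hab hb'
  simp only [← pvS_eq ps] at hmono
  exact pvHead_le_of_le
    (h _ (hperm.subset (List.getElem_mem _)))
    (h _ (hperm.subset (List.getElem_mem _)))
    hmono

lemma pvWeak_iff_exists (ps : List (List Int)) (p : List Int) :
    pvWeak ps p = true ↔ ∃ q ∈ ps, pvIx p 0 < pvIx q 0 ∧ pvIx p 1 < pvIx q 1 := by
  rw [pvWeak, List.any_eq_true]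
  simp

-- the row with the largest attack is never weak
lemma pvLast_not_weak (ps : List (List Int))
    (h : Pre_numberOfWeakCharacters_improved_brute_force ps) (hne : pvS ps ≠ []) :
    pvWeak ps ((pvS ps).getD ((pvS ps).length - 1) []) = false := by
  have hn : 1 ≤ (pvS ps).length := List.length_pos_iff.mpr hne
  rw [← Bool.not_eq_true, pvWeak_iff_exists]
  rintro ⟨q, hq, hqa, _⟩
  have hperm : (pvS ps).Perm ps := PySem.List.sorted_perm ps (fun x => x) false
  obtain ⟨m, hm, hqe⟩ := List.mem_iff_getElem.mp (hperm.mem_iff.mpr hq)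
  have hqgd : (pvS ps).getD m [] = q := by rw [List.getD_eq_getElem _ _ hm, hqe]
  have hle := pvMono ps h (show m ≤ (pvS ps).length - 1 by omega)
    (show (pvS ps).length - 1 < (pvS ps).length by omega)
  rw [hqgd] at hle
  omega

-- A's per-index counting condition is exactly weakness of the i-th sorted row
lemma pvCountedIff (ps : List (List Int))
    (h : Pre_numberOfWeakCharacters_improved_brute_force ps) (k : Nat)
    (hk : k < (pvS ps).length - 1) :
    (pvAt (pvS ps) (k : Int) 0 < pvAt (pvS ps) (-1) 0 ∧
      (pvAt (pvS ps) (k : Int) 1 <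
         pvAt (pvS ps) (pvWhileA (pvS ps) (k : Int) (((pvS ps).length : Int) - 1)) 1 ∧
       pvAt (pvS ps) (k : Int) 0 <
         pvAt (pvS ps) (pvWhileA (pvS ps) (k : Int) (((pvS ps).length : Int) - 1)) 0)) ↔
    pvWeak ps ((pvS ps).getD k []) = true := by
  set s := pvS ps with hs
  have hn : 2 ≤ s.length := by omega
  have hperm : s.Perm ps := PySem.List.sorted_perm ps (fun x => x) false
  obtain ⟨h1, h2, h3, h4⟩ := pvWhileA_spec s (k : Int) ((s.length : Int) - 1) (by omega)
  set r := pvWhileA s (k : Int) ((s.length : Int) - 1) with hr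
  have hr0 : (0 : Int) ≤ r := by omega
  have hrn : r.toNat < s.length := by omega
  have hsk0 : pvAt s (k : Int) 0 = pvIx (s.getD k []) 0 := by rw [pvAt, pvRow_natCast]
  have hsk1 : pvAt s (k : Int) 1 = pvIx (s.getD k []) 1 := by rw [pvAt, pvRow_natCast]
  have hsr : ∀ c, pvAt s r c = pvIx (s.getD r.toNat []) c := by
    intro c
    rw [pvAt, pvRow_of_nonneg s hr0]
  have hlast : pvAt s (-1) 0 = pvIx (s.getD (s.length - 1) []) 0 := by
    rw [pvAt, pvRow_neg_one s (by intro hnil; rw [hnil] at hn; simp at hn)]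
  constructor
  · rintro ⟨_, hd, ha⟩
    rw [hsk1, hsr 1] at hd
    rw [hsk0, hsr 0] at ha
    rw [pvWeak_iff_exists]
    exact ⟨s.getD r.toNat [],
      hperm.subset (by rw [List.getD_eq_getElem _ _ hrn]; exact List.getElem_mem _), ha, hd⟩
  · intro hw
    rw [pvWeak_iff_exists] at hw
    obtain ⟨q, hq, hqa, hqd⟩ := hw
    obtain ⟨m, hm, hqe⟩ := List.mem_iff_getElem.mp (hperm.mem_iff.mpr hq)
    have hqgd : s.getD m [] = q := by rw [List.getD_eq_getElem _ _ hm, hqe]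
    have hkm : k < m := by
      by_contra hx
      push Not at hx
      have hle := pvMono ps h hx (show k < s.length by omega)
      rw [← hs] at hle
      rw [hqgd] at hle
      omega
    have hmr : (m : Int) ≤ r := by
      by_contra hx
      push Not at hx
      have hle := h3 (m : Int) hx (by omega)
      rw [pvAt, pvRow_natCast, hqgd, hsk1] at hle
      omega
    have hdr : pvAt s (k : Int) 1 < pvAt s r 1 := h4.resolve_left (by omega)
    refine ⟨?_, hdr, ?_⟩
    · rw [hlast, hsk0]
      have hle := pvMono ps h (show m ≤ s.length - 1 by omega)
        (show s.length - 1 < s.length by omega)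
      rw [← hs] at hle
      rw [hqgd] at hle
      omega
    · rw [hsr 0, hsk0]
      have hle := pvMono ps h (show m ≤ r.toNat by omega) hrn
      rw [← hs] at hle
      rw [hqgd] at hle
      omega

-- A = countP pvWeak
lemma pvA_eq_count (ps : List (List Int))
    (h : Pre_numberOfWeakCharacters_improved_brute_force ps) :
    numberOfWeakCharacters_improved_brute_force ps = ((ps.countP (pvWeak ps)) : Int) := by
  simp only [numberOfWeakCharacters_improved_brute_force]
  rw [show PySem.List.sorted ps (fun x => x) false = pvS ps from rfl]
  set s := pvS ps with hs
  have hperm : s.Perm ps := PySem.List.sorted_perm ps (fun x => x) false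
  by_cases hnil : s = []
  · have hps : ps = [] := (PySem.List.sorted_eq_nil_iff ps (fun x => x) false).mp hnil
    rw [hnil, hps]
    decide
  · have hn1 : 1 ≤ s.length := List.length_pos_iff.mpr hnil
    rw [show PySem.List.pyRange 0 ((s.length : Int) - 1)
        = (List.range (s.length - 1)).map (fun k : Nat => (k : Int)) from by
      rw [show ((s.length : Int) - 1) = ((s.length - 1 : Nat) : Int) by omega,
        PySem.List.pyRange_zero_natCast]]
    rw [List.foldl_map]
    rw [PySem.List.foldl_congr_mem (List.range (s.length - 1)) _
      (fun (res : Int) (k : Nat) => if pvWeak ps (s.getD k []) = true then res + 1 else res) 0 ?_]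
    · rw [PySem.List.foldl_ite_add_one (fun k : Nat => pvWeak ps (s.getD k []) = true)]
      have hcnt : (List.range (s.length - 1)).countP
            (fun k => decide (pvWeak ps (s.getD k []) = true))
          = (List.range s.length).countP (fun k => pvWeak ps (s.getD k [])) := by
        conv_rhs => rw [show s.length = (s.length - 1) + 1 by omega, List.range_succ]
        rw [List.countP_append]
        have hl : pvWeak ps (s.getD (s.length - 1) []) = false := pvLast_not_weak ps h hnil
        rw [List.getD_eq_getElem?_getD] at hl
        simp [hl]
      rw [hcnt, pvCountP_range s [] (pvWeak ps), hperm.countP_eq (pvWeak ps)]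
      ring
    · intro acc k hkmem
      have hk : k < s.length - 1 := List.mem_range.mp hkmem
      have hiff := pvCountedIff ps h k hk
      rw [← hs] at hiff
      show (if pvAt s (k : Int) 0 < pvAt s (-1) 0 then
          if pvAt s (k : Int) 1 < pvAt s (pvWhileA s (k : Int) ((s.length : Int) - 1)) 1 ∧
             pvAt s (k : Int) 0 < pvAt s (pvWhileA s (k : Int) ((s.length : Int) - 1)) 0
          then acc + 1 else acc
        else acc) = if pvWeak ps (s.getD k []) = true then acc + 1 else acc
      by_cases hw : pvWeak ps (s.getD k []) = true
      · obtain ⟨c1, c2⟩ := hiff.mpr hw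
        rw [if_pos c1, if_pos c2, if_pos hw]
      · rw [if_neg hw]
        by_cases hc1 : pvAt s (k : Int) 0 < pvAt s (-1) 0
        · rw [if_pos hc1, if_neg (fun c2 => hw (hiff.mp ⟨hc1, c2⟩))]
        · rw [if_neg hc1]

-- lexicographic key used by B's sort
def pvKeyL (p : List Int) : Lex (Int × Int) := toLex (-(pvIx p 0), pvIx p 1)

-- an element of B's sorted list is weak iff some earlier element has strictly larger defense
lemma pvWeak_iff_pre (ps pre rest : List (List Int)) (p : List Int)
    (hperm : (pre ++ p :: rest).Perm ps)
    (hpair : (pre ++ p :: rest).Pairwise (fun a b => pvKeyL a ≤ pvKeyL b)) :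
    pvWeak ps p = true ↔ ∃ x ∈ pre, pvIx p 1 < pvIx x 1 := by
  obtain ⟨hp1, hp2, hcross⟩ := List.pairwise_append.mp hpair
  constructor
  · intro hw
    rw [pvWeak, List.any_eq_true] at hw
    obtain ⟨q, hq, hcond⟩ := hw
    rw [Bool.and_eq_true, decide_eq_true_eq, decide_eq_true_eq] at hcond
    have hqmem : q ∈ pre ++ p :: rest := hperm.mem_iff.mpr hq
    rcases List.mem_append.mp hqmem with hqpre | hqrest
    · exact ⟨q, hqpre, hcond.2⟩
    · rcases List.mem_cons.mp hqrest with rfl | hqrest'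
      · exact absurd hcond.1 (lt_irrefl _)
      · have hle : pvKeyL p ≤ pvKeyL q := (List.pairwise_cons.mp hp2).1 q hqrest'
        have hlt : pvKeyL q < pvKeyL p := by
          rw [pvKeyL, pvKeyL, Prod.Lex.lt_iff]
          left
          simpa using hcond.1
        exact absurd hlt (not_lt.mpr hle)
  · rintro ⟨x, hx, hdx⟩
    have hle : pvKeyL x ≤ pvKeyL p := hcross x hx p (List.mem_cons_self ..)
    have hax : pvIx p 0 < pvIx x 0 := by
      rw [pvKeyL, pvKeyL, Prod.Lex.le_iff] at hle
      rcases hle with hlt | ⟨heq, hled⟩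
      · simpa using hlt
      · exfalso
        exact absurd hled (not_le.mpr hdx)
    rw [pvWeak, List.any_eq_true]
    exact ⟨x, hperm.mem_iff.mp (List.mem_append_left _ hx),
      by rw [Bool.and_eq_true, decide_eq_true_eq, decide_eq_true_eq]; exact ⟨hax, hdx⟩⟩

-- loop invariant for B's sweep
lemma pvB_inv (ps : List (List Int)) :
    ∀ (rest pre : List (List Int)) (m : Option Int) (c : Int),
      (pre ++ rest).Perm ps →
      (pre ++ rest).Pairwise (fun a b => pvKeyL a ≤ pvKeyL b) →
      (match m with
       | none => pre = []
       | some v => (∃ x ∈ pre, pvIx x 1 = v) ∧ ∀ x ∈ pre, pvIx x 1 ≤ v) →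
      (rest.foldl pvStepB (m, c)).2 = c + (rest.countP (pvWeak ps) : Int) := by
  intro rest
  induction rest with
  | nil => intro pre m c _ _ _; simp
  | cons p rest' ih =>
    intro pre m c hperm hpair hm
    have hiff := pvWeak_iff_pre ps pre rest' p hperm hpair
    have hassoc : (pre ++ [p]) ++ rest' = pre ++ p :: rest' := by simp
    rw [List.foldl_cons]
    cases m with
    | none =>
      have hpre : pre = [] := hm
      subst hpre
      have hw : pvWeak ps p = false := by
        rw [← Bool.not_eq_true]
        intro hwt
        obtain ⟨x, hx, _⟩ := hiff.mp hwt
        simp at hx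
      rw [show pvStepB (none, c) p = (some (pvIx p 1), c) from rfl]
      rw [ih [p] (some (pvIx p 1)) c (by simpa using hperm) (by simpa using hpair)
        ⟨⟨p, by simp⟩, by simp⟩]
      rw [List.countP_cons, hw]
      push_cast
      ring
    | some v =>
      obtain ⟨⟨xv, hxv, hxveq⟩, hbound⟩ := hm
      by_cases hlt : pvIx p 1 < v
      · have hw : pvWeak ps p = true := hiff.mpr ⟨xv, hxv, by omega⟩
        rw [show pvStepB (some v, c) p = (some v, c + 1) from by simp [pvStepB, hlt]]
        rw [ih (pre ++ [p]) (some v) (c + 1) (hassoc ▸ hperm) (hassoc ▸ hpair)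
          ⟨⟨xv, List.mem_append_left _ hxv, hxveq⟩, ?_⟩]
        · rw [List.countP_cons, hw, if_pos rfl]
          push_cast
          ring
        · intro x hx
          rcases List.mem_append.mp hx with hx' | hx'
          · exact hbound x hx'
          · rw [List.mem_singleton.mp hx']
            exact le_of_lt hlt
      · have hw : pvWeak ps p = false := by
          rw [← Bool.not_eq_true]
          intro hwt
          obtain ⟨x, hx, hdx⟩ := hiff.mp hwt
          exact absurd (hbound x hx) (by omega)
        rw [show pvStepB (some v, c) p = (some (pvIx p 1), c) from by simp [pvStepB, hlt]]
        rw [ih (pre ++ [p]) (some (pvIx p 1)) c (hassoc ▸ hperm) (hassoc ▸ hpair)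
          ⟨⟨p, List.mem_append_right _ (List.mem_singleton_self _), rfl⟩, ?_⟩]
        · rw [List.countP_cons, hw]
          simp
        · intro x hx
          rcases List.mem_append.mp hx with hx' | hx'
          · exact le_trans (hbound x hx') (by omega)
          · rw [List.mem_singleton.mp hx']

-- sorted2 with integer keys is sorted with the lexicographic pair key
lemma pvSorted2_eq_sorted_lex (xs : List (List Int)) (k1 k2 : List Int → Int) :
    PySem.List.sorted2 xs k1 k2 = PySem.List.sorted xs (fun x => toLex (k1 x, k2 x)) := by
  rw [PySem.List.sorted_eq_foldl_insertBy]
  show List.foldl (fun acc x => PySem.List.insertBy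
      (fun a b => decide (k1 a < k1 b) || (!decide (k1 b < k1 a) && decide (k2 a < k2 b))) x acc) [] xs = _
  have hbf : (fun a b => decide (k1 a < k1 b) || (!decide (k1 b < k1 a) && decide (k2 a < k2 b)))
      = (fun a b : List Int => decide (toLex (k1 a, k2 a) < toLex (k1 b, k2 b))) := by
    funext a b
    by_cases h1 : k1 a < k1 b <;> by_cases h2 : k1 b < k1 a <;> by_cases h3 : k2 a < k2 b <;>
      simp [Prod.Lex.lt_iff, h1, h2, h3] <;> omega
  rw [hbf]

-- B = countP pvWeak
lemma pvB_eq_count (ps : List (List Int)) :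
    numberOfWeakCharacters_improved_brute_force_alt ps = ((ps.countP (pvWeak ps)) : Int) := by
  show ((PySem.List.sorted2 ps (fun p => -(pvIx p 0)) (fun p => pvIx p 1)).foldl pvStepB
      ((none : Option Int), (0 : Int))).2 = _
  rw [pvSorted2_eq_sorted_lex]
  have hperm : (PySem.List.sorted ps (fun x => pvKeyL x)).Perm ps :=
    PySem.List.sorted_perm ps _ false
  have hpair : (PySem.List.sorted ps (fun x => pvKeyL x)).Pairwise
      (fun a b => pvKeyL a ≤ pvKeyL b) := PySem.List.sorted_pairwise ps _
  have := pvB_inv ps (PySem.List.sorted ps (fun x => pvKeyL x)) [] none 0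
    (by simpa using hperm) (by simpa using hpair) rfl
  rw [show (fun x => toLex (-(pvIx x 0), pvIx x 1)) = (fun x => pvKeyL x) from rfl]
  rw [this, hperm.countP_eq (pvWeak ps)]
  ring

-- ===== VERDICT (by name: the statement is the Claim_ definition above) =====
theorem numberOfWeakCharacters_improved_brute_force_spec : Claim_equal_numberOfWeakCharacters_improved_brute_force := by
  intro ps _ hpre
  unfold Spec_numberOfWeakCharacters_improved_brute_force
  rw [pvA_eq_count ps hpre, pvB_eq_count ps]
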